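-- pv_equiv track=rewrite | github.com/mpgermano/Genetic-tetris-AI | ai.py | calculateAggregateHeightAndBumpiness
-- ===== SOURCE A (Python) =====
-- def calculateAggregateHeightAndBumpiness(board):
--
-- 	rows = range(len(board))
-- 	columns = range(len(board[0]))
-- 	aggregateHeight = 0
-- 	columnHeight = 0
-- 	bumpiness = 0
-- 	first = True
--
-- 	for c in reversed(columns):
-- 		previousHeight = columnHeight
-- 		reachedEmpty = False
-- 		columnHeight = 23
-- 		for r in reversed(rows):
-- 			if reachedEmpty and board[r][c] != 0:
-- 				reachedEmpty = False
--
-- 			if board[r][c] == 0 and not reachedEmpty: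
-- 				reachedEmpty = True
-- 				columnHeight = 23 - (r+1)
--
-- 		if not first:
-- 			bumpyDelta = abs(previousHeight - columnHeight)
-- 			bumpiness = bumpiness + bumpyDelta
-- 			aggregateHeight = aggregateHeight + columnHeight
--
-- 		if first:
-- 			aggregateHeight = aggregateHeight + columnHeight
-- 			first = False
-- 	result = []
-- 	result.append(aggregateHeight)
-- 	result.append(bumpiness)
-- 	return result
-- ===== SOURCE B (Python) =====
-- def calculateAggregateHeightAndBumpiness(board):
--     # Height of a column = 22 - r for the topmost cell r that is empty and rests
--     # on a filled cell (or on the floor); 23 if the column has no empty cell.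
--     def column_height(column):
--         n = len(column)
--         for r in range(n):
--             if column[r] == 0 and (r + 1 == n or column[r + 1] != 0):
--                 return 22 - r
--         return 23
--
--     heights = [column_height([row[c] for row in board]) for c in range(len(board[0]))]
--     bumpiness = sum(abs(a - b) for a, b in zip(heights, heights[1:]))
--     return [sum(heights), bumpiness]
-- ===== Notes on version B (the rewrite author's own statement) =====
-- stated objective: simpler
-- what changed: B drops A's reversed-row scan with the reachedEmpty toggle entirely: each column height is found by a forward top-down search for the first empty cell resting on a filled cell (or the floor), with early exit, and aggregate height and bumpiness are then two plain reductions over the heights list instead of A's interleaved reversed-column loop with first/previousHeight bookkeeping.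
import Mathlib
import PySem

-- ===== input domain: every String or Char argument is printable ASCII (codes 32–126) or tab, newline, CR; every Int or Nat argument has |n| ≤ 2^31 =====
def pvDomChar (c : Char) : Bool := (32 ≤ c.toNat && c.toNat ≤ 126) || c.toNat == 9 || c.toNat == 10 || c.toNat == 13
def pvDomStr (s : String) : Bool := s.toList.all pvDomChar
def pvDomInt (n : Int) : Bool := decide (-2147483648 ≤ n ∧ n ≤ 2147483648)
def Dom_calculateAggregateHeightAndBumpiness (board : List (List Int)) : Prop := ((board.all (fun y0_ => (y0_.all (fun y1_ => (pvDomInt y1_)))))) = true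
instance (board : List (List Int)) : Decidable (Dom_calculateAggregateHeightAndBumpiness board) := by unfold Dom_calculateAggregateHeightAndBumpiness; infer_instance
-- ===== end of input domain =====

-- B replaces A's reversed-row toggle scan by a forward top-down search for the first
-- empty cell resting on a filled cell (or the floor), and the interleaved outer loop
-- by two plain reductions over the heights list (simpler; same return value).

-- ===== PORT A =====
-- literal transliteration of A: fold over reversed columns carrying
-- (aggregateHeight, columnHeight, bumpiness, first); inner fold over reversed rows
-- carrying (reachedEmpty, columnHeight).
def calculateAggregateHeightAndBumpiness (board : List (List Int)) : List Int :=
  let rows := List.range board.length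
  let columns := List.range (board.headD []).length
  let res := columns.reverse.foldl
    (fun (st : Int × Int × Int × Bool) (c : Nat) =>
      let columnHeight := (rows.reverse.foldl
        (fun (s : Bool × Int) (r : Nat) =>
          let re := if s.1 && ((board.getD r []).getD c 0 != 0) then false else s.1
          if ((board.getD r []).getD c 0 == 0) && !re then (true, 23 - ((r : Int) + 1))
          else (re, s.2))
        (false, 23)).2
      -- 'if not first': add bumpyDelta and columnHeight
      let st1 := if !st.2.2.2 then
          (st.1 + columnHeight, columnHeight, st.2.2.1 + |st.2.1 - columnHeight|, st.2.2.2)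
        else (st.1, columnHeight, st.2.2.1, st.2.2.2)
      -- 'if first': add columnHeight, clear first
      if st1.2.2.2 then (st1.1 + columnHeight, st1.2.1, st1.2.2.1, false) else st1)
    (0, 0, 0, true)
  [res.1, res.2.2.1]

-- ===== PORT B =====
-- B's column_height: forward search down the column for the first empty cell whose
-- successor is filled (or which is the last cell); early exit with 22 - r, else 23.
def pvHeightB : List Int → Nat → Int
  | [], _ => 23
  | [x], r => if x = 0 then 22 - (r : Int) else 23
  | x :: y :: t, r => if x = 0 ∧ y ≠ 0 then 22 - (r : Int) else pvHeightB (y :: t) (r + 1)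

def calculateAggregateHeightAndBumpiness_alt (board : List (List Int)) : List Int :=
  let heights := (List.range (board.headD []).length).map
      (fun c => pvHeightB (board.map (fun row => row.getD c 0)) 0)
  let bumpiness := (heights.zip heights.tail).foldl (fun acc p => acc + |p.1 - p.2|) 0
  [heights.sum, bumpiness]

-- ===== PRECONDITION & SPEC =====
-- Pre_ excludes exactly the inputs where A raises IndexError: an empty board
-- (board[0]) or a row shorter than row 0 (board[r][c] out of range).
def Pre_calculateAggregateHeightAndBumpiness (board : List (List Int)) : Prop :=
  board ≠ [] ∧ ∀ row ∈ board, (board.headD []).length ≤ row.length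
instance (board : List (List Int)) : Decidable (Pre_calculateAggregateHeightAndBumpiness board) := by unfold Pre_calculateAggregateHeightAndBumpiness; infer_instance

def pvWitness_calculateAggregateHeightAndBumpiness : List (List Int) := [[0, 0], [1, 0]]

def Spec_calculateAggregateHeightAndBumpiness (board : List (List Int)) (out : List Int) : Prop := out = calculateAggregateHeightAndBumpiness_alt board
instance (board : List (List Int)) (out : List Int) : Decidable (Spec_calculateAggregateHeightAndBumpiness board out) := by unfold Spec_calculateAggregateHeightAndBumpiness; infer_instance

-- ===== CLAIM (what is proved, stated in full; the proofs are below) =====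
def Claim_equal_calculateAggregateHeightAndBumpiness : Prop := ∀ (board : List (List Int)), Dom_calculateAggregateHeightAndBumpiness board → Pre_calculateAggregateHeightAndBumpiness board → Spec_calculateAggregateHeightAndBumpiness board (calculateAggregateHeightAndBumpiness board)

-- ===== LEMMAS AND PROOFS =====

-- proof-side model of A's inner loop: one step, and the whole reversed-row scan
def pvStep (x : Int) (r : Nat) (s : Bool × Int) : Bool × Int :=
  let re := if s.1 && (x != 0) then false else s.1
  if (x == 0) && !re then (true, 23 - ((r : Int) + 1)) else (re, s.2)

def pvG' : List Int → Nat → Bool × Int → Bool × Int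
  | [], _, s => s
  | x :: t, r, s => pvStep x r (pvG' t (r + 1) s)

lemma pvG'_snoc : ∀ (l : List Int) (x : Int) (r : Nat) (s : Bool × Int),
    pvG' (l ++ [x]) r s = pvG' l r (pvStep x (r + l.length) s) := by
  intro l
  induction l with
  | nil => intro x r s; simp [pvG']
  | cons y t ih =>
    intro x r s
    have hn : r + (y :: t).length = (r + 1) + t.length := by simp; omega
    rw [List.cons_append]
    show pvStep y r (pvG' (t ++ [x]) (r + 1) s) = _
    rw [ih, hn]
    rfl

-- A's inner reversed fold over indices equals pvG' over the column values
lemma fold_eq_pvG' : ∀ (col : List Int) (s : Bool × Int),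
    (List.range col.length).reverse.foldl
      (fun (s : Bool × Int) (r : Nat) => pvStep (col.getD r 0) r s) s
    = pvG' col 0 s := by
  intro col
  induction col using List.reverseRecOn with
  | nil => intro s; simp [pvG']
  | append_singleton l x ih =>
    intro s
    have hlen : (l ++ [x]).length = l.length + 1 := by simp
    rw [hlen, List.range_succ, List.reverse_append, List.reverse_singleton]
    simp only [List.singleton_append, List.foldl_cons]
    have hget : (l ++ [x]).getD l.length 0 = x := by
      simp

    rw [hget]
    have hcongr : ∀ (s' : Bool × Int),
        (List.range l.length).reverse.foldl
          (fun (s : Bool × Int) (r : Nat) => pvStep ((l ++ [x]).getD r 0) r s) s'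
        = (List.range l.length).reverse.foldl
          (fun (s : Bool × Int) (r : Nat) => pvStep (l.getD r 0) r s) s' := by
      intro s'
      apply PySem.List.foldl_congr_mem
      intro b a hmem
      have ha : a < l.length := List.mem_range.mp (List.mem_reverse.mp hmem)
      rw [List.getD_append _ _ _ _ ha]
    rw [hcongr, ih, pvG'_snoc]
    simp
  -- done

-- the result of the toggle scan: flag = head-is-zero, height = B's forward search
lemma pvG'_spec : ∀ (col : List Int) (r : Nat),
    pvG' col r (false, 23) = (col.headD 1 == 0, pvHeightB col r) := by
  intro col
  induction col with
  | nil => intro r; simp [pvG', pvHeightB]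
  | cons x t ih =>
    intro r
    simp only [pvG', ih]
    cases t with
    | nil =>
      by_cases hx : x = 0 <;>
        simp [pvStep, pvHeightB, hx] <;> omega
    | cons y t' =>
      by_cases hx : x = 0 <;> by_cases hy : y = 0 <;>
        simp [pvStep, pvHeightB, hx, hy] <;> omega

-- column access bridge: A's board[r][c] equals indexing into the extracted column
lemma getD_col : ∀ (board : List (List Int)) (r c : Nat),
    (board.getD r []).getD c 0 = (board.map (fun row => row.getD c 0)).getD r 0 := by
  intro board
  induction board with
  | nil => intro r c; simp
  | cons row rest ih =>
    intro r c
    cases r with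
    | zero => simp
    | succ r' => simpa using ih r' c

-- A's whole inner fold over row indices equals B's column height
lemma innerA_eq_heightB (board : List (List Int)) (c : Nat) :
    ((List.range board.length).reverse.foldl
      (fun (s : Bool × Int) (r : Nat) =>
        let re := if s.1 && ((board.getD r []).getD c 0 != 0) then false else s.1
        if ((board.getD r []).getD c 0 == 0) && !re then (true, 23 - ((r : Int) + 1))
        else (re, s.2))
      (false, 23)).2
    = pvHeightB (board.map (fun row => row.getD c 0)) 0 := by
  set col := board.map (fun row => row.getD c 0) with hcol
  have hlen : board.length = col.length := by simp [hcol]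
  have hfun : (fun (s : Bool × Int) (r : Nat) =>
        let re := if s.1 && ((board.getD r []).getD c 0 != 0) then false else s.1
        if ((board.getD r []).getD c 0 == 0) && !re then (true, 23 - ((r : Int) + 1))
        else (re, s.2))
      = fun (s : Bool × Int) (r : Nat) => pvStep (col.getD r 0) r s := by
    funext s r
    rw [getD_col board r c, ← hcol]
    rfl
  rw [hlen, hfun, fold_eq_pvG', pvG'_spec]

-- proof-side model of A's outer loop, acting on the column heights directly
def pvLoopH : List Int → Int × Int × Int × Bool → Int × Int × Int × Bool
  | [], st => st
  | x :: t, st =>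
    if st.2.2.2 then pvLoopH t (st.1 + x, x, st.2.2.1, false)
    else pvLoopH t (st.1 + x, x, st.2.2.1 + |st.2.1 - x|, false)

def pvLastD (d : Int) : List Int → Int
  | [] => d
  | x :: t => pvLastD x t

def pvBumpFrom (p : Int) : List Int → Int
  | [] => 0
  | x :: t => |p - x| + pvBumpFrom x t

def pvBumpA : List Int → Int
  | [] => 0
  | x :: t => pvBumpFrom x t

lemma foldA_eq_loopH (board : List (List Int)) :
    ∀ (cs : List Nat) (st : Int × Int × Int × Bool),
    cs.foldl
      (fun (st : Int × Int × Int × Bool) (c : Nat) =>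
        let columnHeight := ((List.range board.length).reverse.foldl
          (fun (s : Bool × Int) (r : Nat) =>
            let re := if s.1 && ((board.getD r []).getD c 0 != 0) then false else s.1
            if ((board.getD r []).getD c 0 == 0) && !re then (true, 23 - ((r : Int) + 1))
            else (re, s.2))
          (false, 23)).2
        let st1 := if !st.2.2.2 then
            (st.1 + columnHeight, columnHeight, st.2.2.1 + |st.2.1 - columnHeight|, st.2.2.2)
          else (st.1, columnHeight, st.2.2.1, st.2.2.2)
        if st1.2.2.2 then (st1.1 + columnHeight, st1.2.1, st1.2.2.1, false) else st1)
      st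
    = pvLoopH (cs.map (fun c => pvHeightB (board.map (fun row => row.getD c 0)) 0)) st := by
  intro cs
  induction cs with
  | nil => intro st; rfl
  | cons c cs ih =>
    intro st
    simp only [List.foldl_cons, List.map_cons, pvLoopH]
    rw [ih]
    rw [innerA_eq_heightB board c]
    cases st.2.2.2 <;> simp

lemma loopH_false : ∀ (t : List Int) (agg colH bump : Int),
    pvLoopH t (agg, colH, bump, false)
      = (agg + t.sum, pvLastD colH t, bump + pvBumpFrom colH t, false) := by
  intro t
  induction t with
  | nil => intro agg colH bump; simp [pvLoopH, pvLastD, pvBumpFrom]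
  | cons x t ih =>
    intro agg colH bump
    show pvLoopH t (agg + x, x, bump + |colH - x|, false) = _
    rw [ih]
    simp only [List.sum_cons, pvLastD, pvBumpFrom]
    rw [add_assoc, add_assoc]

lemma zipfold_eq_bumpA : ∀ (hs : List Int) (acc : Int),
    (hs.zip hs.tail).foldl (fun acc p => acc + |p.1 - p.2|) acc = acc + pvBumpA hs := by
  intro hs
  induction hs with
  | nil => intro acc; simp [pvBumpA]
  | cons a t ih =>
    intro acc
    cases t with
    | nil => simp [pvBumpA, pvBumpFrom]
    | cons b t' =>
      have : ((a :: b :: t').zip (a :: b :: t').tail)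
          = (a, b) :: ((b :: t').zip (b :: t').tail) := by simp
      rw [this, List.foldl_cons, ih]
      simp [pvBumpA, pvBumpFrom]
      ring

lemma bumpFrom_append : ∀ (l : List Int) (p a : Int),
    pvBumpFrom p (l ++ [a]) = pvBumpFrom p l + |pvLastD p l - a| := by
  intro l
  induction l with
  | nil => intro p a; simp [pvBumpFrom, pvLastD]
  | cons x t ih =>
    intro p a
    simp only [List.cons_append, pvBumpFrom, pvLastD]
    rw [ih]
    ring

lemma bumprev : ∀ (l : List Int) (x : Int),
    pvBumpA (l.reverse ++ [x]) = pvBumpFrom x l := by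
  intro l
  induction l with
  | nil => intro x; simp [pvBumpA, pvBumpFrom]
  | cons y t ih =>
    intro x
    have h0 : (y :: t).reverse ++ [x] = t.reverse ++ ([y] ++ [x]) := by simp
    rw [h0]
    cases h : t.reverse with
    | nil =>
      have ht : t = [] := by
        have := congrArg List.reverse h; simpa using this
      subst ht
      simp [pvBumpA, pvBumpFrom, abs_sub_comm]
    | cons z u =>
      have e1 : pvBumpA (z :: (u ++ ([y] ++ [x]))) = pvBumpFrom z ((u ++ [y]) ++ [x]) := by
        show pvBumpFrom z (u ++ ([y] ++ [x])) = _
        rw [List.append_assoc]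
      show pvBumpA (z :: (u ++ ([y] ++ [x]))) = pvBumpFrom x (y :: t)
      rw [e1, bumpFrom_append]
      have h3 : pvBumpFrom z (u ++ [y]) = pvBumpFrom y t := by
        have := ih y; rw [h] at this
        simpa [pvBumpA] using this
      have h4 : pvLastD z (u ++ [y]) = y := by
        clear e1 h3 ih h h0
        induction u generalizing z with
        | nil => rfl
        | cons w u ihu => simpa [pvLastD] using ihu w
      rw [h3, h4, abs_sub_comm y x]
      show pvBumpFrom y t + |x - y| = pvBumpFrom x (y :: t)
      simp only [pvBumpFrom]
      ring

lemma bumpA_reverse (hs : List Int) : pvBumpA hs.reverse = pvBumpA hs := by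
  cases hs with
  | nil => rfl
  | cons x t => simp only [List.reverse_cons, pvBumpA]; exact bumprev t x

-- ===== VERDICT (by name: the statement is the Claim_ definition above) =====
theorem calculateAggregateHeightAndBumpiness_spec : Claim_equal_calculateAggregateHeightAndBumpiness := by
  intro board _ _
  unfold Spec_calculateAggregateHeightAndBumpiness
  unfold calculateAggregateHeightAndBumpiness calculateAggregateHeightAndBumpiness_alt
  simp only []
  rw [foldA_eq_loopH, List.map_reverse]
  set hs := (List.range (board.headD []).length).map
      (fun c => pvHeightB (board.map (fun row => row.getD c 0)) 0) with hhs
  rw [zipfold_eq_bumpA]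
  cases h : hs.reverse with
  | nil =>
    have : hs = [] := by simpa using congrArg List.reverse h
    rw [this] at h ⊢
    simp [pvLoopH, pvBumpA]
  | cons x t =>
    have hsum : hs.sum = x + t.sum := by
      rw [← List.sum_reverse, h]; simp
    have hbump : pvBumpA hs = pvBumpFrom x t := by
      rw [← bumpA_reverse, h]; rfl
    have e2 : pvLoopH (x :: t) (0, 0, 0, true) = pvLoopH t (0 + x, x, 0, false) := rfl
    rw [e2, loopH_false]
    simp [hsum, hbump]
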